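-- pv_equiv track=rewrite | github.com/AdamField118/learningCNNs | implementations/weak1_foundations/convolution_from_scratch/src/utils/mathematical_analysis.py | calculate_receptive_field_multilayer
-- ===== SOURCE A (Python) =====
-- def calculate_receptive_field_multilayer(kernel_sizes, strides, dilations=None):
--     """
--     Calculate receptive field through multiple CNN layers.
--
--     Moved from convolution_mechanics.py
--     """
--     if dilations is None:
--         dilations = [1] * len(kernel_sizes)
--
--     rf = 1
--     jump = 1
--     rf_progression = [rf]
--
--     for kernel_size, stride, dilation in zip(kernel_sizes, strides, dilations):
--         effective_kernel = kernel_size + (kernel_size - 1) * (dilation - 1)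
--         rf = rf + (effective_kernel - 1) * jump
--         jump = jump * stride
--         rf_progression.append(rf)
--
--     return rf_progression
-- ===== SOURCE B (Python) =====
-- def calculate_receptive_field_multilayer(kernel_sizes, strides, dilations=None):
--     ds = [1] * len(kernel_sizes) if dilations is None else dilations
--     layers = list(zip(kernel_sizes, strides, ds))
--     # jump table: prefix products of strides, starting at 1
--     jumps = [1]
--     for _, s, _ in layers:
--         jumps.append(jumps[-1] * s)
--     # per-layer contributions (effective_kernel - 1) * jump
--     contribs = [(k + (k - 1) * (d - 1) - 1) * j
--                 for (k, _, d), j in zip(layers, jumps)]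
--     # cumulative sum starting from 1
--     out = [1]
--     for c in contribs:
--         out.append(out[-1] + c)
--     return out
-- ===== Notes on version B (the rewrite author's own statement) =====
-- stated objective: alternative
-- what changed: Replaced A's single fused accumulator loop with three separate passes: a jump table of stride prefix-products, a list of per-layer contributions (effective_kernel-1)*jump, and a cumulative sum starting from 1.
import Mathlib
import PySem

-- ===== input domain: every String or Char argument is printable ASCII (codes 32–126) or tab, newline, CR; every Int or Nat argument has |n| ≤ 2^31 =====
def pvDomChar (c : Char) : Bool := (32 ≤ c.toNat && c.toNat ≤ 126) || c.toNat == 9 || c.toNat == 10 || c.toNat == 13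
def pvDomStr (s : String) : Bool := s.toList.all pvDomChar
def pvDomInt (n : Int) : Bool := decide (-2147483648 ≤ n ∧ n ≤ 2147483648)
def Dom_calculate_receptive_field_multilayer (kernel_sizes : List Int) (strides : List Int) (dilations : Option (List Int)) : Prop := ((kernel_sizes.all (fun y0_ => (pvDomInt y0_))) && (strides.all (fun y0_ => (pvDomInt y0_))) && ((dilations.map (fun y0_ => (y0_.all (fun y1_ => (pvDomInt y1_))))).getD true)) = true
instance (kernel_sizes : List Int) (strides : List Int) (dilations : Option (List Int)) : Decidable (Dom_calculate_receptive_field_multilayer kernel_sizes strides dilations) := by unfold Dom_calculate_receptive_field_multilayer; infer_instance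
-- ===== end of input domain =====

-- B replaces A's fused accumulator loop by a jump table + per-layer contributions + cumulative sum (alternative decomposition, same cost).

-- ===== PORT A =====
-- the fused loop over zip(kernel_sizes, strides, dilations) with state (rf, jump, rf_progression)
def crfA_loop (z : List (Int × Int × Int)) (st : Int × Int × List Int) : Int × Int × List Int :=
  z.foldl (fun st ksd =>
    let effective_kernel := ksd.1 + (ksd.1 - 1) * (ksd.2.2 - 1)
    let rf' := st.1 + (effective_kernel - 1) * st.2.1
    (rf', st.2.1 * ksd.2.1, st.2.2 ++ [rf'])) st

def calculate_receptive_field_multilayer (kernel_sizes : List Int) (strides : List Int) (dilations : Option (List Int)) : List Int :=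
  let ds := match dilations with
    | none => List.replicate kernel_sizes.length 1
    | some d => d
  (crfA_loop (kernel_sizes.zip (strides.zip ds)) (1, 1, [1])).2.2

-- ===== PORT B =====
-- jumps = [1]; for layer append jumps[-1] * stride  (prefix products of strides)
def crfB_jumps (j : Int) : List (Int × Int × Int) → List Int
  | [] => [j]
  | l :: ls => j :: crfB_jumps (j * l.2.1) ls

-- out = [1]; for c in contribs append out[-1] + c  (cumulative sum from 1)
def crfB_accum (r : Int) : List Int → List Int
  | [] => [r]
  | c :: cs => r :: crfB_accum (r + c) cs

def calculate_receptive_field_multilayer_alt (kernel_sizes : List Int) (strides : List Int) (dilations : Option (List Int)) : List Int :=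
  let ds := match dilations with
    | none => List.replicate kernel_sizes.length 1
    | some d => d
  let layers := kernel_sizes.zip (strides.zip ds)
  let jumps := crfB_jumps 1 layers
  let contribs := List.zipWith (fun (l : Int × Int × Int) (j : Int) => (l.1 + (l.1 - 1) * (l.2.2 - 1) - 1) * j) layers jumps
  crfB_accum 1 contribs

-- ===== PRECONDITION & SPEC =====
def Spec_calculate_receptive_field_multilayer (kernel_sizes : List Int) (strides : List Int) (dilations : Option (List Int)) (out : List Int) : Prop := out = calculate_receptive_field_multilayer_alt kernel_sizes strides dilations
instance (kernel_sizes : List Int) (strides : List Int) (dilations : Option (List Int)) (out : List Int) : Decidable (Spec_calculate_receptive_field_multilayer kernel_sizes strides dilations out) := by unfold Spec_calculate_receptive_field_multilayer; infer_instance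

-- ===== CLAIM (what is proved, stated in full; the proofs are below) =====
def Claim_equal_calculate_receptive_field_multilayer : Prop := ∀ (kernel_sizes : List Int) (strides : List Int) (dilations : Option (List Int)), Dom_calculate_receptive_field_multilayer kernel_sizes strides dilations → Spec_calculate_receptive_field_multilayer kernel_sizes strides dilations (calculate_receptive_field_multilayer kernel_sizes strides dilations)

-- ===== LEMMAS AND PROOFS =====

-- canonical value both sides compute: the successive receptive fields after each layer
def crfSpec : List (Int × Int × Int) → Int → Int → List Int
  | [], _, _ => []
  | l :: ls, rf, jump =>
      let rf' := rf + (l.1 + (l.1 - 1) * (l.2.2 - 1) - 1) * jump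
      rf' :: crfSpec ls rf' (jump * l.2.1)

lemma crfA_loop_eq (z : List (Int × Int × Int)) (rf jump : Int) (prog : List Int) :
    (crfA_loop z (rf, jump, prog)).2.2 = prog ++ crfSpec z rf jump := by
  induction z generalizing rf jump prog with
  | nil => simp [crfA_loop, crfSpec]
  | cons l ls ih => simp [crfA_loop, crfSpec] at ih ⊢; rw [ih]; simp

lemma crfB_eq (z : List (Int × Int × Int)) (rf jump : Int) :
    crfB_accum rf (List.zipWith (fun (l : Int × Int × Int) (j : Int) => (l.1 + (l.1 - 1) * (l.2.2 - 1) - 1) * j) z (crfB_jumps jump z)) = rf :: crfSpec z rf jump := by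
  induction z generalizing rf jump with
  | nil => simp [crfB_jumps, crfB_accum, crfSpec]
  | cons l ls ih => simp [crfB_jumps, crfB_accum, crfSpec, ih]

-- ===== VERDICT (by name: the statement is the Claim_ definition above) =====
theorem calculate_receptive_field_multilayer_spec : Claim_equal_calculate_receptive_field_multilayer := by
  intro ks ss ds _
  unfold Spec_calculate_receptive_field_multilayer
  unfold calculate_receptive_field_multilayer calculate_receptive_field_multilayer_alt
  simp only [crfA_loop_eq, crfB_eq, List.singleton_append]
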